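-- pv_equiv track=rewrite | github.com/JamesYuuu/tick | src/tick/app.py | weighted_widths
-- ===== SOURCE A (Python) =====
-- from collections.abc import Sequence
--
-- def weighted_widths(total_width: int, weights: Sequence[int]) -> tuple[int, ...]:
--     if total_width <= 0:
--         return tuple(0 for _ in weights)
--     total_weight = sum(weights)
--     widths = [(total_width * weight) // total_weight for weight in weights]
--     remainders = [(total_width * weight) % total_weight for weight in weights]
--     remaining = total_width - sum(widths)
--     for index in sorted(range(len(weights)), key=lambda i: remainders[i], reverse=True)[:remaining]:
--         widths[index] += 1
--     while any(width == 0 for width in widths) and any(width > 1 for width in widths):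
--         smallest = widths.index(0)
--         largest = max(range(len(widths)), key=lambda i: widths[i])
--         widths[largest] -= 1
--         widths[smallest] += 1
--     return tuple(widths)
-- ===== SOURCE B (Python) =====
-- def weighted_widths(total_width, weights):
--     if total_width <= 0:
--         return tuple(0 for _ in weights)
--     total_weight = sum(weights)
--     widths = [(total_width * weight) // total_weight for weight in weights]
--     remainders = [(total_width * weight) % total_weight for weight in weights]
--     remaining = total_width - sum(widths)
--     for index in sorted(range(len(weights)), key=lambda i: remainders[i], reverse=True)[:remaining]:
--         widths[index] += 1
--     # closed-form redistribution: k = number of zeros that can be fixed; the k units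
--     # are taken from the tallest entries, levelled down to a water level `lvl`.
--     zeros = widths.count(0)
--     surplus = sum(w - 1 for w in widths if w > 1)
--     k = min(zeros, surplus)
--     if k == 0:
--         return tuple(widths)
--     def removed(level):
--         return sum(w - level for w in widths if w > level)
--     lvl = max(widths)
--     while removed(lvl - 1) <= k:
--         lvl -= 1
--     d = k - removed(lvl)  # entries at the water level that lose one extra unit
--     out = []
--     c = 0   # entries >= lvl seen so far
--     z = 0   # zeros fixed so far
--     for w in widths:
--         if w == 0 and z < k:
--             out.append(1)
--             z += 1
--         elif w >= lvl:
--             out.append(lvl - 1 if c < d else lvl)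
--             c += 1
--         else:
--             out.append(w)
--     return tuple(out)
-- ===== Notes on version B (the rewrite author's own statement) =====
-- stated objective: faster
-- what changed: A's zero-fixing while-loop (rescan the list for a zero, for the current maximum and for both loop conditions, move one unit, repeat) is replaced by a closed-form water-level redistribution: B counts the fixable zeros k = min(zeros, surplus) once, locates the level the k repeated leftmost-max decrements settle at, and emits the whole result in one final pass; the largest-remainder apportionment preamble is unchanged.
import Mathlib
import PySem

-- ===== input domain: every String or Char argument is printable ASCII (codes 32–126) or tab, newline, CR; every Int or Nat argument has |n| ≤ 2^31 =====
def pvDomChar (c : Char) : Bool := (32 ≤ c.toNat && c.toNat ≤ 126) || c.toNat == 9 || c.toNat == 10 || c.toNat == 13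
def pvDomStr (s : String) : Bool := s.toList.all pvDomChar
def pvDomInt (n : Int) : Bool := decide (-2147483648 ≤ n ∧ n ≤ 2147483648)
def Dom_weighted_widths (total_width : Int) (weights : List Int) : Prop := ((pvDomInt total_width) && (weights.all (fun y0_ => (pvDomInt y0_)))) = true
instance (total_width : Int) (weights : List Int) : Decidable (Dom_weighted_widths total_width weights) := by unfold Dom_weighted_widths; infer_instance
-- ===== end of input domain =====

-- B replaces A's quadratic zero-fixing while-loop (rescan for a zero, for the max, move one
-- unit, repeat) by a closed-form "water level" redistribution computed once; return values
-- are proved equal (no argument is mutated by either Lean port; Python A mutates no argument).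

-- ===== PORT A =====

-- max(range(len(ws)), key=lambda i: widths[i]) : running best, strictly-greater replaces,
-- so the FIRST index attaining the maximum is returned (Python max tie rule)
def wwAArgmaxGo : List Int → Nat → Nat → Int → Nat
  | [], _, bi, _ => bi
  | x :: xs, i, bi, bv => if bv < x then wwAArgmaxGo xs (i+1) i x else wwAArgmaxGo xs (i+1) bi bv

def wwAArgmax : List Int → Nat
  | [] => 0
  | x :: xs => wwAArgmaxGo xs 1 0 x

-- the while loop; fuel = initial list length suffices (each iteration turns the first 0 into
-- a 1 and never creates a 0, so there are at most (count of zeros) ≤ length iterations)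
def wwALoop : Nat → List Int → List Int
  | 0, ws => ws
  | fuel+1, ws =>
    if ws.any (fun w => w == 0) && ws.any (fun w => 1 < w) then
      let smallest := (PySem.List.index? ws 0).getD 0
      let largest := wwAArgmax ws
      let ws1 := ws.set largest (ws.getD largest 0 - 1)
      let ws2 := ws1.set smallest (ws1.getD smallest 0 + 1)
      wwALoop fuel ws2
    else ws

def weighted_widths (total_width : Int) (weights : List Int) : List Int :=
  if total_width ≤ 0 then weights.map (fun _ => 0)
  else
    let total_weight := weights.sum
    let widths := weights.map (fun w => PySem.Int.floordiv (total_width * w) total_weight)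
    let remainders := weights.map (fun w => PySem.Int.mod (total_width * w) total_weight)
    let remaining := total_width - widths.sum
    let order := PySem.List.slice
      (PySem.List.sorted (List.range weights.length) (fun i => remainders.getD i 0) true)
      none (some remaining)
    let widths := order.foldl (fun ws i => ws.set i (ws.getD i 0 + 1)) widths
    wwALoop widths.length widths

-- ===== PORT B =====

-- removed(level) = sum(w - level for w in widths if w > level)
def wwBRemoved (ws : List Int) (level : Int) : Int :=
  ws.foldl (fun acc w => if level < w then acc + (w - level) else acc) 0

-- while removed(lvl - 1) <= k: lvl -= 1   (fuel: the scan descends at most k levels)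
def wwBScan : Nat → Int → List Int → Int → Int
  | 0, _, _, lvl => lvl
  | fuel+1, k, ws, lvl =>
    if wwBRemoved ws (lvl - 1) ≤ k then wwBScan fuel k ws (lvl - 1) else lvl

-- the final single pass building the output with the two counters c and z
def wwBBuild : List Int → Int → Int → Int → Int → Int → List Int
  | [], _, _, _, _, _ => []
  | w :: ws, k, lvl, d, c, z =>
    if w == 0 && z < k then 1 :: wwBBuild ws k lvl d c (z+1)
    else if lvl ≤ w then (if c < d then lvl - 1 else lvl) :: wwBBuild ws k lvl d (c+1) z
    else w :: wwBBuild ws k lvl d c z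

-- the closed-form redistribution on the already-apportioned widths
def wwBPhase2 (widths : List Int) : List Int :=
  let zeros : Int := (widths.count 0 : Int)
  let surplus := widths.foldl (fun acc w => if 1 < w then acc + (w - 1) else acc) 0
  let k := min zeros surplus
  if k == 0 then widths
  else
    let lvl := wwBScan (k.toNat + 1) k widths
      ((PySem.List.max? widths (fun w => w)).getD 0)
    let d := k - wwBRemoved widths lvl
    wwBBuild widths k lvl d 0 0

def weighted_widths_alt (total_width : Int) (weights : List Int) : List Int :=
  if total_width ≤ 0 then weights.map (fun _ => 0)
  else
    let total_weight := weights.sum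
    let widths := weights.map (fun w => PySem.Int.floordiv (total_width * w) total_weight)
    let remainders := weights.map (fun w => PySem.Int.mod (total_width * w) total_weight)
    let remaining := total_width - widths.sum
    let order := PySem.List.slice
      (PySem.List.sorted (List.range weights.length) (fun i => remainders.getD i 0) true)
      none (some remaining)
    let widths := order.foldl (fun ws i => ws.set i (ws.getD i 0 + 1)) widths
    wwBPhase2 widths

-- ===== PRECONDITION & SPEC =====

-- Pre_ excludes exactly the inputs where Python A raises ZeroDivisionError
-- (total_width > 0 with a nonempty weights list summing to 0); B raises there too.
def Pre_weighted_widths (total_width : Int) (weights : List Int) : Prop :=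
  total_width ≤ 0 ∨ weights = [] ∨ weights.sum ≠ 0
instance (total_width : Int) (weights : List Int) : Decidable (Pre_weighted_widths total_width weights) := by unfold Pre_weighted_widths; infer_instance

def pvWitness_weighted_widths : Int × List Int := (10, [1, 2, 3])

def Spec_weighted_widths (total_width : Int) (weights : List Int) (out : List Int) : Prop := out = weighted_widths_alt total_width weights
instance (total_width : Int) (weights : List Int) (out : List Int) : Decidable (Spec_weighted_widths total_width weights out) := by unfold Spec_weighted_widths; infer_instance

-- ===== CLAIM (what is proved, stated in full; the proofs are below) =====
def Claim_equal_weighted_widths : Prop := ∀ (total_width : Int) (weights : List Int), Dom_weighted_widths total_width weights → Pre_weighted_widths total_width weights → Spec_weighted_widths total_width weights (weighted_widths total_width weights)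

-- ===== LEMMAS AND PROOFS =====

-- ---- proof-side abbreviations ----

-- total amount sitting above level l ("water above l")
def pvT (v : List Int) (l : Int) : Int := (v.map (fun w => max (w - l) 0)).sum
-- number of entries ≥ l, as an Int
def pvCGe (v : List Int) (l : Int) : Int := (v.countP (fun w => l ≤ w) : Int)
-- number of zero entries, as an Int
def pvZC (v : List Int) : Int := (v.count 0 : Int)
-- number of loop iterations A performs / zeros B fixes
def pvK (v : List Int) : Int := min (pvZC v) (pvT v 1)

theorem wwBRemoved_eq_pvT (v : List Int) (l : Int) : wwBRemoved v l = pvT v l := by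
  unfold wwBRemoved pvT
  have h1 : List.foldl (fun acc w => if l < w then acc + (w - l) else acc) 0 v
      = List.foldl (fun acc w => acc + max (w - l) 0) 0 v :=
    PySem.List.foldl_congr_mem v _ _ 0 (by intro acc x _; split_ifs <;> omega)
  rw [h1, PySem.List.foldl_add]
  omega

theorem pvT_nonneg (v : List Int) (l : Int) : 0 ≤ pvT v l := by
  apply List.sum_nonneg
  intro x hx
  rcases List.mem_map.1 hx with ⟨w, _, rfl⟩
  omega

theorem pvT_antitone (v : List Int) {l l' : Int} (h : l ≤ l') : pvT v l' ≤ pvT v l := by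
  apply List.sum_le_sum
  intro w _
  omega

theorem pvT_pred (v : List Int) (l : Int) : pvT v (l - 1) = pvT v l + pvCGe v l := by
  induction v with
  | nil => simp [pvT, pvCGe]
  | cons w t ih =>
    simp only [pvT, pvCGe, List.map_cons, List.sum_cons, List.countP_cons] at *
    split_ifs with h <;> simp at h <;> push_cast <;> omega

theorem pvT_eq_zero (v : List Int) (l : Int) (h : ∀ w ∈ v, w ≤ l) : pvT v l = 0 := by
  apply List.sum_eq_zero
  intro x hx
  rcases List.mem_map.1 hx with ⟨w, hw, rfl⟩
  have := h w hw
  omega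

theorem le_pvT_of_mem {v : List Int} {w : Int} (hw : w ∈ v) (l : Int) : w - l ≤ pvT v l := by
  have h1 : max (w - l) 0 ∈ v.map (fun w => max (w - l) 0) := List.mem_map_of_mem hw
  have h2 : max (w - l) 0 ≤ pvT v l := by
    apply List.single_le_sum _ _ h1
    intro x hx
    rcases List.mem_map.1 hx with ⟨y, _, rfl⟩
    omega
  omega

theorem exists_gt_of_pvT_pos {v : List Int} {l : Int} (h : 0 < pvT v l) : ∃ w ∈ v, l < w := by
  by_contra hc
  have hall : ∀ w ∈ v, w ≤ l := fun w hw => le_of_not_gt (fun hlt => hc ⟨w, hw, hlt⟩)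
  have := pvT_eq_zero v l hall
  omega

theorem pvT_set (v : List Int) (p : Nat) (hp : p < v.length) (x l : Int) :
    pvT (v.set p x) l = pvT v l - max (v[p] - l) 0 + max (x - l) 0 := by
  induction v generalizing p with
  | nil => simp at hp
  | cons w t ih =>
    cases p with
    | zero => simp [pvT]; ring
    | succ p =>
      simp only [List.set_cons_succ, pvT, List.map_cons, List.sum_cons] at *
      have := ih p (by simpa using hp)
      simp only [List.getElem_cons_succ]
      omega

theorem countP_set_int (v : List Int) (p : Nat) (hp : p < v.length) (x : Int) (f : Int → Bool) :
    (((v.set p x).countP f : Int)) =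
      (v.countP f : Int) + (if f x then 1 else 0) - (if f v[p] then 1 else 0) := by
  induction v generalizing p with
  | nil => simp at hp
  | cons w t ih =>
    cases p with
    | zero =>
      simp only [List.set_cons_zero, List.countP_cons, List.getElem_cons_zero]
      push_cast
      split_ifs <;> omega
    | succ p =>
      simp only [List.set_cons_succ, List.countP_cons, List.getElem_cons_succ]
      have := ih p (by simpa using hp)
      push_cast at *
      split_ifs at * <;> omega

theorem countP_take_set_int (v : List Int) (p : Nat) (hp : p < v.length) (x : Int)
    (f : Int → Bool) (i : Nat) :
    ((((v.set p x).take i).countP f : Int)) =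
      ((v.take i).countP f : Int) +
        (if p < i then (if f x then 1 else 0) - (if f v[p] then 1 else 0) else 0) := by
  rw [List.take_set]
  by_cases hpi : p < i
  · have hplen : p < (v.take i).length := by
      simp [List.length_take]; omega
    rw [countP_set_int _ p hplen]
    rw [List.getElem_take]
    rw [if_pos hpi]
    split_ifs <;> omega
  · rw [List.set_eq_of_length_le (by simp [List.length_take]; omega)]
    simp [hpi]



-- ---- the argmax helper returns the first index attaining the maximum ----

theorem wwAArgmaxGo_spec : ∀ (xs pre : List Int) (bi : Nat) (bv : Int),
    bi < pre.length → (∀ (hbi : bi < pre.length), pre[bi] = bv) →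
    (∀ j (hj : j < pre.length), pre[j] ≤ bv) →
    (∀ j (hj : j < pre.length), j < bi → pre[j] < bv) →
    ∃ hr : wwAArgmaxGo xs pre.length bi bv < (pre ++ xs).length,
      (∀ j (hj : j < (pre ++ xs).length), (pre ++ xs)[j] ≤ (pre ++ xs)[wwAArgmaxGo xs pre.length bi bv]) ∧
      (∀ j (hj : j < (pre ++ xs).length), j < wwAArgmaxGo xs pre.length bi bv → (pre ++ xs)[j] < (pre ++ xs)[wwAArgmaxGo xs pre.length bi bv]) := by
  intro xs
  induction xs with
  | nil =>
    intro pre bi bv hbi hval hmax hlt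
    simp only [wwAArgmaxGo, List.append_nil]
    exact ⟨hbi, fun j hj => by rw [hval hbi]; exact hmax j hj,
           fun j hj hjr => by rw [hval hbi]; exact hlt j hj hjr⟩
  | cons x xs ih =>
    intro pre bi bv hbi hval hmax hlt
    have hassoc : (pre ++ [x]) ++ xs = pre ++ x :: xs := by simp
    have hlen1 : (pre ++ [x]).length = pre.length + 1 := by simp
    by_cases hx : bv < x
    · have h := ih (pre ++ [x]) pre.length x
        (by simp) (by intro h'; simp)
        (by
          intro j hj
          have hj2 : j < pre.length + 1 := by simpa using hj
          rcases Nat.lt_or_ge j pre.length with h1 | h1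
          · rw [List.getElem_append_left h1]
            have := hmax j h1; omega
          · have hje : j = pre.length := by omega
            subst hje
            simp)
        (by
          intro j hj hjlt
          rw [List.getElem_append_left hjlt]
          have := hmax j hjlt; omega)
      rw [hlen1, hassoc] at h
      simpa [wwAArgmaxGo, if_pos hx] using h
    · have h := ih (pre ++ [x]) bi bv
        (by simp; omega)
        (by intro h'; rw [List.getElem_append_left hbi]; exact hval hbi)
        (by
          intro j hj
          have hj2 : j < pre.length + 1 := by simpa using hj
          rcases Nat.lt_or_ge j pre.length with h1 | h1
          · rw [List.getElem_append_left h1]; exact hmax j h1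
          · have hje : j = pre.length := by omega
            subst hje
            simp; omega)
        (by
          intro j hj hjlt
          have hj1 : j < pre.length := by omega
          rw [List.getElem_append_left hj1]
          exact hlt j hj1 hjlt)
      rw [hlen1, hassoc] at h
      simpa [wwAArgmaxGo, if_neg hx] using h

theorem wwAArgmax_spec (v : List Int) (hv : v ≠ []) :
    ∃ hr : wwAArgmax v < v.length,
      (∀ j (hj : j < v.length), v[j] ≤ v[wwAArgmax v]) ∧
      (∀ j (hj : j < v.length), j < wwAArgmax v → v[j] < v[wwAArgmax v]) := by
  cases v with
  | nil => exact absurd rfl hv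
  | cons x t =>
    have h := wwAArgmaxGo_spec t [x] 0 x (by simp) (by intro _; simp) (by
        intro j hj
        have hj0 : j = 0 := by simpa using hj
        subst hj0; simp) (by intro j hj h0; omega)
    simpa [wwAArgmax] using h

-- ---- the scan computes the unique water level ----

theorem wwBScan_eq (v : List Int) (k : Int) :
    ∀ (fuel : Nat) (lvl L : Int), pvT v lvl ≤ k → L ≤ lvl →
      pvT v L ≤ k → k < pvT v (L - 1) → (lvl - L).toNat < fuel →
      wwBScan fuel k v lvl = L := by
  intro fuel
  induction fuel with
  | zero => intro lvl L _ _ _ _ h; omega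
  | succ fuel ih =>
    intro lvl L h1 h2 h3 h4 h5
    unfold wwBScan
    rw [wwBRemoved_eq_pvT]
    rcases eq_or_lt_of_le h2 with heq | hlt
    · subst heq
      rw [if_neg (by omega)]
    · have hle : pvT v (lvl - 1) ≤ k :=
        le_trans (pvT_antitone v (by omega : L ≤ lvl - 1)) h3
      rw [if_pos hle]
      exact ih (lvl - 1) L hle (by omega) h3 h4 (by omega)

theorem le_of_pvT_eq_zero {v : List Int} {l : Int} (h : pvT v l = 0) :
    ∀ w ∈ v, w ≤ l := by
  intro w hw
  have := le_pvT_of_mem hw l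
  omega

theorem exists_level (v : List Int) (k : Int) (hk0 : 0 ≤ k) (hk0' : k < pvT v 0) :
    ∃ L, 1 ≤ L ∧ pvT v L ≤ k ∧ k < pvT v (L - 1) := by
  have hmain : ∀ (n : Nat) (l : Int), 0 ≤ l → pvT v l ≤ k → l.toNat ≤ n →
      ∃ L, 1 ≤ L ∧ pvT v L ≤ k ∧ k < pvT v (L - 1) := by
    intro n
    induction n with
    | zero =>
      intro l hl0 hlk hln
      have : l = 0 := by omega
      subst this
      omega
    | succ n ihn =>
      intro l hl0 hlk hln
      have hl1 : 1 ≤ l := by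
        rcases eq_or_lt_of_le hl0 with h | h
        · exfalso; rw [← h] at hlk; omega
        · omega
      by_cases hstop : k < pvT v (l - 1)
      · exact ⟨l, hl1, hlk, hstop⟩
      · exact ihn (l - 1) (by omega) (by omega) (by omega)
  have hstart0 : (0 : Int) ≤ 1 + pvT v 1 := by have := pvT_nonneg v 1; omega
  have hstartT : pvT v (1 + pvT v 1) = 0 := by
    apply pvT_eq_zero
    intro w hw
    have := le_pvT_of_mem hw 1
    omega
  exact hmain (1 + pvT v 1).toNat (1 + pvT v 1) hstart0 (by omega) le_rfl

-- ---- the build pass, characterised element by element ----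

theorem wwBBuild_length (ws : List Int) (k lvl d : Int) :
    ∀ (c z : Int), (wwBBuild ws k lvl d c z).length = ws.length := by
  induction ws with
  | nil => intro c z; simp [wwBBuild]
  | cons w t ih =>
    intro c z
    unfold wwBBuild
    split_ifs <;> simp [ih]

theorem wwBBuild_getElem? (ws : List Int) (k lvl d : Int) (hl : 1 ≤ lvl) :
    ∀ (c z : Int) (i : Nat) (hi : i < ws.length),
    (wwBBuild ws k lvl d c z)[i]? =
      some (if ws[i] = 0 ∧ z + ((ws.take i).count 0 : Int) < k then 1
        else if lvl ≤ ws[i] ∧ c + ((ws.take i).countP (fun w => lvl ≤ w) : Int) < d then lvl - 1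
        else if lvl ≤ ws[i] then lvl
        else ws[i]) := by
  induction ws with
  | nil => intro c z i hi; simp at hi
  | cons w t ih =>
    intro c z i hi
    unfold wwBBuild
    by_cases hb1 : (w == 0 && decide (z < k)) = true
    · have hb1' : w = 0 ∧ z < k := by simpa using hb1
      rw [if_pos hb1]
      match i with
      | 0 =>
        simp only [List.take_zero, List.count_nil, List.countP_nil, List.getElem_cons_zero,
          Nat.cast_zero, add_zero, List.getElem?_cons_zero, Option.some.injEq]
        split_ifs <;> omega
      | Nat.succ i =>
        have hi' : i < t.length := by simpa using hi
        rw [List.getElem?_cons_succ, ih c (z + 1) i hi']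
        obtain ⟨hw0, hzk⟩ := hb1'
        subst hw0
        have hld : (decide (lvl ≤ (0:Int))) = false := by simp; omega
        simp only [List.getElem_cons_succ, List.take_succ_cons, List.count_cons,
          List.countP_cons, Option.some.injEq, beq_self_eq_true, if_true, hld, if_false,
          add_zero]
        push_cast
        split_ifs <;> omega
    · have hb1' : ¬ (w = 0 ∧ z < k) := by simpa using hb1
      rw [if_neg hb1]
      by_cases hlw : lvl ≤ w
      · rw [if_pos hlw]
        match i with
        | 0 =>
          simp only [List.take_zero, List.count_nil, List.countP_nil, List.getElem_cons_zero,
            Nat.cast_zero, add_zero, List.getElem?_cons_zero, Option.some.injEq]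
          split_ifs <;> omega
        | Nat.succ i =>
          have hi' : i < t.length := by simpa using hi
          rw [List.getElem?_cons_succ, ih (c + 1) z i hi']
          have hw0 : (w == (0:Int)) = false := by simp; omega
          have hld : (decide (lvl ≤ w)) = true := by simpa using hlw
          simp only [List.getElem_cons_succ, List.take_succ_cons, List.count_cons,
            List.countP_cons, Option.some.injEq, hw0, hld, if_true, if_false, add_zero]
          push_cast
          split_ifs <;> omega
      · rw [if_neg hlw]
        match i with
        | 0 =>
          simp only [List.take_zero, List.count_nil, List.countP_nil, List.getElem_cons_zero,
            Nat.cast_zero, add_zero, List.getElem?_cons_zero, Option.some.injEq]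
          split_ifs <;> omega
        | Nat.succ i =>
          have hi' : i < t.length := by simpa using hi
          rw [List.getElem?_cons_succ, ih c z i hi']
          have hld : (decide (lvl ≤ w)) = false := by simpa using hlw
          by_cases hw0 : w = 0
          · have hw0' : (w == (0:Int)) = true := by simpa using hw0
            simp only [List.getElem_cons_succ, List.take_succ_cons, List.count_cons,
              List.countP_cons, Option.some.injEq, hw0', hld, if_true, if_false, add_zero]
            push_cast
            split_ifs <;> omega
          · have hw0' : (w == (0:Int)) = false := by simpa using hw0
            simp only [List.getElem_cons_succ, List.take_succ_cons, List.count_cons,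
              List.countP_cons, Option.some.injEq, hw0', hld, if_false, add_zero]
            push_cast
            split_ifs <;> omega

-- ---- bridging phase2 to the build pass ----

theorem count0_eq_countP (v : List Int) : v.count 0 = v.countP (fun w => w == 0) :=
  List.count_eq_countP

theorem take_countP_set2_int (v : List Int) (p q : Nat) (hp : p < v.length)
    (hq : q < v.length) (hpq : p ≠ q) (x y vp vq : Int) (hvp : v[p] = vp)
    (hvq : v[q] = vq) (f : Int → Bool) (i : Nat) :
    ((((v.set p x).set q y).take i).countP f : Int)
      = ((v.take i).countP f : Int)
        + (if p < i then (if f x then 1 else 0) - (if f vp then 1 else 0) else 0)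
        + (if q < i then (if f y then 1 else 0) - (if f vq then 1 else 0) else 0) := by
  rw [countP_take_set_int (v.set p x) q (by simpa using hq) y f i,
      countP_take_set_int v p hp x f i,
      List.getElem_set_ne (by omega), hvp, hvq]

theorem phase2_k0 (u : List Int) (h : pvK u = 0) : wwBPhase2 u = u := by
  simp only [wwBPhase2]
  rw [show List.foldl (fun acc w => if 1 < w then acc + (w - 1) else acc) 0 u = pvT u 1 from
    wwBRemoved_eq_pvT u 1]
  rw [show min ((u.count 0 : Int)) (pvT u 1) = pvK u from rfl, h]
  simp

theorem phase2_eq_build (u : List Int) (L : Int) (hk1 : 1 ≤ pvK u) (hL1 : 1 ≤ L)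
    (hTL : pvT u L ≤ pvK u) (hTL1 : pvK u < pvT u (L - 1)) :
    wwBPhase2 u = wwBBuild u (pvK u) L (pvK u - pvT u L) 0 0 := by
  have hne : u ≠ [] := by
    have h1 : 1 ≤ pvZC u := le_trans hk1 (min_le_left _ _)
    intro h; subst h; simp [pvZC] at h1
  obtain ⟨m, hm⟩ : ∃ m, PySem.List.max? u (fun w => w) = some m := by
    cases hmx : PySem.List.max? u (fun w => w) with
    | none => exact absurd ((PySem.List.max?_eq_none_iff u (fun w => w)).1 hmx) hne
    | some m => exact ⟨m, rfl⟩
  have hmmem : m ∈ u := PySem.List.max?_mem hm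
  have hmmax : ∀ y ∈ u, y ≤ m := PySem.List.max?_isMax hm
  have hTm : pvT u m = 0 := pvT_eq_zero u m hmmax
  have hLm : L ≤ m := by
    obtain ⟨w, hwmem, hww⟩ := exists_gt_of_pvT_pos (show 0 < pvT u (L-1) by omega)
    have := hmmax w hwmem
    omega
  have hfuel : (m - L).toNat < (pvK u).toNat + 1 := by
    have := le_pvT_of_mem hmmem L
    omega
  simp only [wwBPhase2]
  rw [show List.foldl (fun acc w => if 1 < w then acc + (w - 1) else acc) 0 u = pvT u 1 from
    wwBRemoved_eq_pvT u 1]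
  rw [show min ((u.count 0 : Int)) (pvT u 1) = pvK u from rfl]
  rw [if_neg (by simp; omega)]
  rw [hm]
  simp only [Option.getD_some]
  rw [wwBScan_eq u (pvK u) ((pvK u).toNat + 1) m L (by omega) hLm hTL hTL1 hfuel]
  rw [wwBRemoved_eq_pvT]

theorem build_eq_self (u : List Int) (L : Int) (hL1 : 1 ≤ L) (hTz : pvT u L = 0) :
    wwBBuild u 0 L 0 0 0 = u := by
  apply List.ext_getElem?
  intro i
  by_cases hi : i < u.length
  · rw [wwBBuild_getElem? u 0 L 0 hL1 0 0 i hi, List.getElem?_eq_getElem hi]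
    have hle : u[i] ≤ L := le_of_pvT_eq_zero hTz _ (List.getElem_mem hi)
    rw [if_neg (by intro h; omega)]
    by_cases h2 : L ≤ u[i]
    · have he : u[i] = L := le_antisymm hle h2
      rw [if_neg (by intro h; omega), if_pos h2, he]
    · rw [if_neg (by intro h; exact h2 h.1), if_neg h2]
  · rw [List.getElem?_eq_none (by rw [wwBBuild_length]; omega),
      List.getElem?_eq_none (by omega)]

-- ---- one loop iteration of A does not change the closed form ----

set_option maxHeartbeats 3200000 in
theorem ww_step (v : List Int) (hk : 1 ≤ pvK v) (p q : Nat)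
    (hp : p < v.length) (hq : q < v.length)
    (hpmax : ∀ j (hj : j < v.length), v[j] ≤ v[p])
    (hpleft : ∀ j (hj : j < v.length), j < p → v[j] < v[p])
    (hq0 : v[q] = 0) (hqleft : ∀ j (hj : j < v.length), j < q → v[j] ≠ 0) :
    pvK ((v.set p (v[p] - 1)).set q 1) = pvK v - 1 ∧
    wwBPhase2 ((v.set p (v[p] - 1)).set q 1) = wwBPhase2 v := by
  have hkS : pvK v ≤ pvT v 1 := min_le_right _ _
  have hkZ' : pvK v ≤ pvZC v := min_le_left _ _
  have hex2 : ∃ w ∈ v, 1 < w := exists_gt_of_pvT_pos (by omega)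
  have hM2 : 2 ≤ v[p] := by
    obtain ⟨w, hwmem, hw1⟩ := hex2
    obtain ⟨j, hj, rfl⟩ := List.mem_iff_getElem.1 hwmem
    have := hpmax j hj
    omega
  have hpq : p ≠ q := by
    intro h
    subst h
    omega
  set M := v[p] with hM
  set v' := (v.set p (M - 1)).set q 1 with hv'
  have hlen' : v'.length = v.length := by simp [hv']
  have hv'q : v'[q]? = some 1 := by
    rw [List.getElem?_eq_getElem (by omega : q < v'.length)]
    simp [hv', List.getElem_set]
  have hv'p : v'[p]? = some (M - 1) := by
    rw [List.getElem?_eq_getElem (by omega : p < v'.length)]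
    simp [hv', List.getElem_set, Ne.symm hpq]
  have hv'other : ∀ j, j < v.length → j ≠ p → j ≠ q → v'[j]? = v[j]? := by
    intro j hj h1 h2
    rw [List.getElem?_eq_getElem (by omega : j < v'.length),
      List.getElem?_eq_getElem (by omega : j < v.length)]
    simp [hv', List.getElem_set, Ne.symm h1, Ne.symm h2]
  -- water-above relations
  have hTset : ∀ l : Int, pvT v' l
      = pvT v l - max (M - l) 0 + max (M - 1 - l) 0 - max (0 - l) 0 + max (1 - l) 0 := by
    intro l
    rw [hv', pvT_set _ q (by simpa using hq) 1 l, pvT_set v p hp (M - 1) l,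
      List.getElem_set_ne (by omega), hq0]
  have hT' : ∀ l : Int, 1 ≤ l → pvT v' l = pvT v l - (if l ≤ M - 1 then 1 else 0) := by
    intro l hl
    rw [hTset l]
    split_ifs <;> omega
  have hT0 : pvT v' 0 = pvT v 0 := by rw [hTset 0]; omega
  -- zero-count relation
  have hZC' : pvZC v' = pvZC v - 1 := by
    have e := take_countP_set2_int v p q hp hq hpq (M - 1) 1 M 0 hM.symm hq0
      (fun w => w == 0) v.length
    rw [List.take_length, show ((v.set p (M-1)).set q 1).take v.length
        = (v.set p (M-1)).set q 1 from List.take_of_length_le (by simp)] at e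
    unfold pvZC
    rw [count0_eq_countP, count0_eq_countP, ← hv'] at *
    have i1 : ((M - 1 : Int) == 0) = false := by simp; omega
    have i2 : ((M : Int) == 0) = false := by simp; omega
    have i3 : ((1 : Int) == 0) = false := by decide
    have i4 : (((0:Int)) == 0) = true := by decide
    rw [i1, i2, i3, i4, if_pos hp, if_pos hq] at e
    simp at e
    omega
  have hK' : pvK v' = pvK v - 1 := by
    unfold pvK
    rw [hZC', hT' 1 (by omega), if_pos (by omega : (1:Int) ≤ M - 1)]
    unfold pvK at hkS hkZ'
    omega
  refine ⟨hK', ?_⟩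
  -- the level for v
  have hT0v : pvK v < pvT v 0 := by
    have hpred := pvT_pred v 1
    rw [show (1:Int) - 1 = 0 by norm_num] at hpred
    have hcg : 1 ≤ pvCGe v 1 := by
      obtain ⟨w, hwmem, hw1⟩ := hex2
      have hpos : 0 < v.countP (fun w => decide (1 ≤ w)) :=
        List.countP_pos_iff.2 ⟨w, hwmem, by simp; omega⟩
      unfold pvCGe
      omega
    omega
  obtain ⟨L, hL1, hTL, hTL1⟩ := exists_level v (pvK v) (by omega) hT0v
  have hLM : L ≤ M := by
    obtain ⟨w, hwmem, hww⟩ := exists_gt_of_pvT_pos (show 0 < pvT v (L - 1) by omega)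
    obtain ⟨j, hj, rfl⟩ := List.mem_iff_getElem.1 hwmem
    have := hpmax j hj
    omega
  have hpredL := pvT_pred v L
  have hdlt : pvK v - pvT v L < pvCGe v L := by omega
  have hd0 : 0 ≤ pvK v - pvT v L := by omega
  have hK'0 : 0 ≤ pvK v' := by
    unfold pvK pvZC
    have := pvT_nonneg v' 1
    omega
  -- facts about first-zero and leftmost-max prefixes
  have htzq : ((v.take q).countP (fun w => w == 0) : Int) = 0 := by
    have hz : (v.take q).countP (fun w => w == 0) = 0 := by
      apply List.countP_eq_zero.2
      intro a ha
      obtain ⟨j, hjlen, hja⟩ := List.mem_iff_getElem.1 ha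
      have hjq : j < q := by simp [List.length_take] at hjlen; omega
      have hjv : j < v.length := by omega
      rw [List.getElem_take] at hja
      simp only [beq_iff_eq]
      rw [← hja]
      exact hqleft j hjv hjq
    simp [hz]
  have himpq : ∀ i (hi : i < v.length), i ≠ q → v[i]'hi = 0 → q < i := by
    intro i hi hne h0
    rcases Nat.lt_trichotomy i q with h | h | h
    · exact absurd h0 (hqleft i hi h)
    · exact absurd h hne
    · exact h
  have hgq : ∀ (h : q < v'.length), v'[q] = 1 := by
    intro h
    have := hv'q
    rw [List.getElem?_eq_getElem h] at this
    exact Option.some.inj this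
  have hgp : ∀ (h : p < v'.length), v'[p] = M - 1 := by
    intro h
    have := hv'p
    rw [List.getElem?_eq_getElem h] at this
    exact Option.some.inj this
  have hgo : ∀ i (h : i < v'.length) (h2 : i < v.length), i ≠ p → i ≠ q → v'[i] = v[i] := by
    intro i h h2 hip hiq
    have := hv'other i h2 hip hiq
    rw [List.getElem?_eq_getElem h, List.getElem?_eq_getElem h2] at this
    exact Option.some.inj this
  have hPv : wwBPhase2 v = wwBBuild v (pvK v) L (pvK v - pvT v L) 0 0 :=
    phase2_eq_build v L hk hL1 hTL hTL1
  by_cases hLle : L ≤ M - 1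
  · -- the decremented maximum stays at or above the level: same level and extra count
    have hch1' : pvT v' L ≤ pvK v' := by
      rw [hK', hT' L hL1, if_pos hLle]; omega
    have hch2' : pvK v' < pvT v' (L - 1) := by
      by_cases hL2 : 2 ≤ L
      · rw [hK', hT' (L - 1) (by omega), if_pos (by omega)]; omega
      · have hLeq : L = 1 := by omega
        rw [hK', hLeq, show (1:Int) - 1 = 0 from by norm_num, hT0]; omega
    have hd' : pvK v' - pvT v' L = pvK v - pvT v L := by
      rw [hK', hT' L hL1, if_pos hLle]; omega
    have hPv' : wwBPhase2 v' = wwBBuild v' (pvK v') L (pvK v' - pvT v' L) 0 0 := by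
      by_cases hkz : 1 ≤ pvK v'
      · exact phase2_eq_build v' L hkz hL1 hch1' hch2'
      · have hkz0 : pvK v' = 0 := by omega
        have hTz : pvT v' L = 0 := by
          have h1 := pvT_nonneg v' L
          rw [hkz0] at hch1'
          omega
        rw [phase2_k0 v' hkz0, hkz0, hTz, show (0:Int) - 0 = 0 from by norm_num]
        exact (build_eq_self v' L hL1 hTz).symm
    rw [hPv, hPv', hd', hK']
    apply List.ext_getElem?
    intro i
    by_cases hi : i < v.length
    · rw [wwBBuild_getElem? v' (pvK v - 1) L (pvK v - pvT v L) hL1 0 0 i (by omega),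
        wwBBuild_getElem? v (pvK v) L (pvK v - pvT v L) hL1 0 0 i hi]
      simp only [Option.some.injEq]
      rw [count0_eq_countP (v.take i), count0_eq_countP (v'.take i)]
      have ez := take_countP_set2_int v p q hp hq hpq (M - 1) 1 M 0 hM.symm hq0
        (fun w => w == 0) i
      have eg := take_countP_set2_int v p q hp hq hpq (M - 1) 1 M 0 hM.symm hq0
        (fun w => decide (L ≤ w)) i
      rw [← hv'] at ez eg
      rw [if_neg (show ¬ (((M - 1 : Int) == 0) = true) from by simp only [beq_iff_eq]; omega),
        if_neg (show ¬ (((M : Int) == 0) = true) from by simp only [beq_iff_eq]; omega),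
        if_neg (show ¬ (((1 : Int) == 0) = true) from by decide),
        if_pos (show (((0 : Int) == 0) = true) from by decide)] at ez
      rw [if_pos (show (decide (L ≤ M - 1)) = true from by simp only [decide_eq_true_eq]; omega),
        if_pos (show (decide (L ≤ M)) = true from by simp only [decide_eq_true_eq]; omega),
        if_neg (show ¬ ((decide (L ≤ (0:Int))) = true) from by simp only [decide_eq_true_eq]; omega)] at eg
      have hdz : L = 1 → pvK v - pvT v L = 0 := by
        intro hLeq; rw [hLeq] at hTL ⊢; omega
      by_cases hL2 : 2 ≤ L
      · rw [if_neg (show ¬ ((decide (L ≤ (1:Int))) = true) from by simp only [decide_eq_true_eq]; omega)] at eg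
        by_cases hqi : q < i <;> by_cases hpi : p < i <;>
          simp only [hqi, hpi, if_true, if_false] at ez eg
        all_goals (
          by_cases hiq : i = q
          · subst hiq
            rw [hgq (by omega), hq0, htzq]
            split_ifs <;> omega
          · by_cases hip : i = p
            · subst hip
              rw [hgp (by omega), ← hM]
              split_ifs <;> omega
            · rw [hgo i (by omega) hi hip hiq]
              have himp := himpq i hi hiq
              split_ifs <;> omega)
      · rw [if_pos (show (decide (L ≤ (1:Int))) = true from by simp only [decide_eq_true_eq]; omega)] at eg
        have hdz' := hdz (by omega)
        by_cases hqi : q < i <;> by_cases hpi : p < i <;>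
          simp only [hqi, hpi, if_true, if_false] at ez eg
        all_goals (
          by_cases hiq : i = q
          · subst hiq
            rw [hgq (by omega), hq0, htzq]
            split_ifs <;> omega
          · by_cases hip : i = p
            · subst hip
              rw [hgp (by omega), ← hM]
              split_ifs <;> omega
            · rw [hgo i (by omega) hi hip hiq]
              have himp := himpq i hi hiq
              split_ifs <;> omega)
    · rw [List.getElem?_eq_none (by rw [wwBBuild_length]; omega),
        List.getElem?_eq_none (by rw [wwBBuild_length]; omega)]
  · -- the level is the maximum itself: it drops the extra count by one
    have hLMe : L = M := by omega
    subst hLMe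
    have hTM : pvT v M = 0 := by
      apply pvT_eq_zero
      intro w hw
      obtain ⟨j, hj, rfl⟩ := List.mem_iff_getElem.1 hw
      exact hpmax j hj
    have hcgM : pvK v < pvCGe v M := by omega
    have hch1' : pvT v' M ≤ pvK v' := by
      rw [hK', hT' M (by omega), if_neg (by omega), hTM]; omega
    have hch2' : pvK v' < pvT v' (M - 1) := by
      rw [hK', hT' (M - 1) (by omega), if_pos (by omega)]; omega
    have hd' : pvK v' - pvT v' M = pvK v - 1 - pvT v M := by
      rw [hK', hT' M (by omega), if_neg (by omega)]; omega
    have hPv' : wwBPhase2 v' = wwBBuild v' (pvK v') M (pvK v' - pvT v' M) 0 0 := by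
      by_cases hkz : 1 ≤ pvK v'
      · exact phase2_eq_build v' M hkz (by omega) hch1' hch2'
      · have hkz0 : pvK v' = 0 := by omega
        have hTz : pvT v' M = 0 := by
          have h1 := pvT_nonneg v' M
          rw [hkz0] at hch1'
          omega
        rw [phase2_k0 v' hkz0, hkz0, hTz, show (0:Int) - 0 = 0 from by norm_num]
        exact (build_eq_self v' M (by omega) hTz).symm
    rw [hPv, hPv', hd', hK', hTM]
    have hgcp : ((v.take p).countP (fun w => decide (M ≤ w)) : Int) = 0 := by
      have hz : (v.take p).countP (fun w => decide (M ≤ w)) = 0 := by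
        apply List.countP_eq_zero.2
        intro a ha
        obtain ⟨j, hjlen, hja⟩ := List.mem_iff_getElem.1 ha
        have hjp : j < p := by simp [List.length_take] at hjlen; omega
        have hjv : j < v.length := by omega
        rw [List.getElem_take] at hja
        have := hpleft j hjv hjp
        simp only [decide_eq_true_eq]
        omega
      simp [hz]
    have himpp : ∀ i (hi : i < v.length), i ≠ p → M ≤ v[i]'hi → p < i := by
      intro i hi hne hMle
      rcases Nat.lt_trichotomy i p with h | h | h
      · have := hpleft i hi h; omega
      · exact absurd h hne
      · exact h
    apply List.ext_getElem?
    intro i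
    by_cases hi : i < v.length
    · rw [wwBBuild_getElem? v' (pvK v - 1) M (pvK v - 1 - 0) (by omega) 0 0 i (by omega),
        wwBBuild_getElem? v (pvK v) M (pvK v - 0) (by omega) 0 0 i hi]
      simp only [Option.some.injEq]
      rw [count0_eq_countP (v.take i), count0_eq_countP (v'.take i)]
      have ez := take_countP_set2_int v p q hp hq hpq (M - 1) 1 M 0 hM.symm hq0
        (fun w => w == 0) i
      have eg := take_countP_set2_int v p q hp hq hpq (M - 1) 1 M 0 hM.symm hq0
        (fun w => decide (M ≤ w)) i
      rw [← hv'] at ez eg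
      rw [if_neg (show ¬ (((M - 1 : Int) == 0) = true) from by simp only [beq_iff_eq]; omega),
        if_neg (show ¬ (((M : Int) == 0) = true) from by simp only [beq_iff_eq]; omega),
        if_neg (show ¬ (((1 : Int) == 0) = true) from by decide),
        if_pos (show (((0 : Int) == 0) = true) from by decide)] at ez
      rw [if_neg (show ¬ ((decide (M ≤ M - 1)) = true) from by simp only [decide_eq_true_eq]; omega),
        if_pos (show (decide (M ≤ M)) = true from by simp only [decide_eq_true_eq]; omega),
        if_neg (show ¬ ((decide (M ≤ (1:Int))) = true) from by simp only [decide_eq_true_eq]; omega),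
        if_neg (show ¬ ((decide (M ≤ (0:Int))) = true) from by simp only [decide_eq_true_eq]; omega)] at eg
      by_cases hqi : q < i <;> by_cases hpi : p < i <;>
        simp only [hqi, hpi, if_true, if_false] at ez eg
      all_goals (
        by_cases hiq : i = q
        · subst hiq
          rw [hgq (by omega), hq0, htzq]
          split_ifs <;> omega
        · by_cases hip : i = p
          · subst hip
            rw [hgp (by omega), ← hM, hgcp]
            split_ifs <;> omega
          · rw [hgo i (by omega) hi hip hiq]
            have himp := himpq i hi hiq
            have himp2 := himpp i hi hip
            split_ifs <;> omega)
    · rw [List.getElem?_eq_none (by rw [wwBBuild_length]; omega),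
        List.getElem?_eq_none (by rw [wwBBuild_length]; omega)]

theorem pvK_le_length (u : List Int) :
    (min ((u.count 0 : Int)) (wwBRemoved u 1)).toNat ≤ u.length := by
  rw [wwBRemoved_eq_pvT]
  have h1 : u.count 0 ≤ u.length := List.count_le_length
  have h2 := pvT_nonneg u 1
  omega

theorem ww_main : ∀ (fuel : Nat) (v : List Int),
    (min ((v.count 0 : Int)) (wwBRemoved v 1)).toNat ≤ fuel →
    wwALoop fuel v = wwBPhase2 v := by
  intro fuel
  induction fuel with
  | zero =>
    intro v hf
    rw [wwBRemoved_eq_pvT] at hf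
    have hk0 : pvK v = 0 := by
      unfold pvK pvZC
      have h1 := pvT_nonneg v 1
      omega
    rw [phase2_k0 v hk0]
    simp only [wwALoop]
  | succ fuel ih =>
    intro v hf
    rw [wwBRemoved_eq_pvT] at hf
    by_cases hk : 1 ≤ pvK v
    · have hzpos : 0 < v.count 0 := by
        have h1 : 1 ≤ pvZC v := le_trans hk (min_le_left _ _)
        unfold pvZC at h1
        omega
      have h0mem : (0:Int) ∈ v := List.count_pos_iff.1 hzpos
      have hTpos : 1 ≤ pvT v 1 := le_trans hk (min_le_right _ _)
      obtain ⟨wgt, hwmem, hwgt⟩ := exists_gt_of_pvT_pos (show 0 < pvT v 1 by omega)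
      have hvne : v ≠ [] := by intro h; subst h; simp at h0mem
      have hcond : (v.any (fun w => w == 0) && v.any (fun w => decide (1 < w))) = true := by
        simp only [Bool.and_eq_true, List.any_eq_true]
        exact ⟨⟨0, h0mem, by decide⟩, ⟨wgt, hwmem, by simpa using hwgt⟩⟩
      obtain ⟨q, hq⟩ : ∃ q, PySem.List.index? v 0 = some q :=
        Option.isSome_iff_exists.1 ((PySem.List.index?_isSome_iff v 0).2 h0mem)
      obtain ⟨hqlt, hq0, hqleft⟩ := PySem.List.getElem_of_index?_eq_some hq
      obtain ⟨hplt, hpmax, hpleft⟩ := wwAArgmax_spec v hvne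
      have hM2 : 2 ≤ v[wwAArgmax v] := by
        obtain ⟨j, hj, rfl⟩ := List.mem_iff_getElem.1 hwmem
        have := hpmax j hj
        omega
      have hpq : wwAArgmax v ≠ q := by
        intro h
        have e1 : v[wwAArgmax v]? = v[q]? := by rw [h]
        rw [List.getElem?_eq_getElem hplt, List.getElem?_eq_getElem hqlt] at e1
        have := Option.some.inj e1
        omega
      have hgetp : v.getD (wwAArgmax v) 0 = v[wwAArgmax v] := List.getD_eq_getElem _ _ hplt
      have hmid : (v.set (wwAArgmax v) (v.getD (wwAArgmax v) 0 - 1)).getD q 0 = 0 := by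
        rw [List.getD_eq_getElem _ _
          (show q < (v.set (wwAArgmax v) (v.getD (wwAArgmax v) 0 - 1)).length by
            simpa using hqlt),
          List.getElem_set_ne hpq, hq0]
      have hstep : wwALoop (fuel + 1) v
          = wwALoop fuel ((v.set (wwAArgmax v) (v.getD (wwAArgmax v) 0 - 1)).set q 1) := by
        simp only [wwALoop, if_pos hcond, hq, Option.getD_some]
        rw [hmid]
        norm_num
      rw [hstep, hgetp]
      obtain ⟨hK', hstep2⟩ := ww_step v hk (wwAArgmax v) q hplt hqlt hpmax hpleft hq0
        (by intro j hj hjq; exact hqleft j hjq)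
      rw [ih ((v.set (wwAArgmax v) (v[wwAArgmax v] - 1)).set q 1)
        (by rw [wwBRemoved_eq_pvT]
            show (pvK ((v.set (wwAArgmax v) (v[wwAArgmax v] - 1)).set q 1)).toNat ≤ fuel
            rw [hK']
            have : (pvK v).toNat ≤ fuel + 1 := hf
            omega)]
      exact hstep2
    · have hk00 : 0 ≤ pvK v := by
        unfold pvK pvZC
        have := pvT_nonneg v 1
        omega
      have hk0 : pvK v = 0 := by omega
      have hcondf : ¬ ((v.any (fun w => w == 0) && v.any (fun w => decide (1 < w))) = true) := by
        simp only [Bool.and_eq_true, List.any_eq_true]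
        rintro ⟨⟨x, hx, hx0⟩, ⟨y, hy, hy1⟩⟩
        have hx0' : x = 0 := by simpa using hx0
        subst hx0'
        have h1 : 0 < v.count 0 := List.count_pos_iff.2 hx
        have h2 : 1 ≤ pvT v 1 := by
          have := le_pvT_of_mem hy 1
          simp at hy1
          omega
        unfold pvK pvZC at hk0
        omega
      rw [phase2_k0 v hk0]
      simp only [wwALoop, if_neg hcondf]

-- ===== VERDICT (by name: the statement is the Claim_ definition above) =====
theorem weighted_widths_spec : Claim_equal_weighted_widths := by
  intro tw ws _ _
  unfold Spec_weighted_widths weighted_widths weighted_widths_alt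
  by_cases h : tw ≤ 0
  · simp [h]
  · simp only [h, if_false]
    apply ww_main
    apply pvK_le_length
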